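-- pv_equiv track=rewrite | github.com/OpenNeuroOrg/dashboard | code/src/openneuro_dashboard/check_s3_files.py | compute_context
-- ===== SOURCE A (Python) =====
-- def compute_context(
--     sorted_files: list[str], changed: set[str], radius: int = 3
-- ) -> list[str]:
--     """Compute context files within ``radius`` sorted positions of any changed file."""
--     context: set[str] = set()
--     for i, f in enumerate(sorted_files):
--         if f in changed:
--             for j in range(
--                 max(0, i - radius), min(len(sorted_files), i + radius + 1)
--             ):
--                 neighbor = sorted_files[j]
--                 if neighbor not in changed:
--                     context.add(neighbor)
--     return sorted(context)
-- ===== SOURCE B (Python) =====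
-- def _last_changed_scan(flags):
--     """out[j] = largest index i <= j with flags[i] true, or None."""
--     out = []
--     last = None
--     for i, fl in enumerate(flags):
--         if fl:
--             last = i
--         out.append(last)
--     return out
--
--
-- def compute_context(sorted_files, changed, radius=3):
--     """Compute context files within ``radius`` sorted positions of any changed file."""
--     n = len(sorted_files)
--     flags = [f in changed for f in sorted_files]
--     left = _last_changed_scan(flags)
--     right = [None if v is None else n - 1 - v
--              for v in reversed(_last_changed_scan(flags[::-1]))]
--     ctx = {f for j, (f, fl, lv, rv) in enumerate(zip(sorted_files, flags, left, right))
--            if not fl and ((lv is not None and j - lv <= radius)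
--                           or (rv is not None and rv - j <= radius))}
--     return sorted(ctx)
-- ===== Notes on version B (the rewrite author's own statement) =====
-- stated objective: faster
-- what changed: Instead of expanding a window around every changed position (O(n*radius)), B computes for each position the nearest changed index on each side with two linear scans and keeps the positions whose nearest changed index is within radius (O(n)).
import Mathlib
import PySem

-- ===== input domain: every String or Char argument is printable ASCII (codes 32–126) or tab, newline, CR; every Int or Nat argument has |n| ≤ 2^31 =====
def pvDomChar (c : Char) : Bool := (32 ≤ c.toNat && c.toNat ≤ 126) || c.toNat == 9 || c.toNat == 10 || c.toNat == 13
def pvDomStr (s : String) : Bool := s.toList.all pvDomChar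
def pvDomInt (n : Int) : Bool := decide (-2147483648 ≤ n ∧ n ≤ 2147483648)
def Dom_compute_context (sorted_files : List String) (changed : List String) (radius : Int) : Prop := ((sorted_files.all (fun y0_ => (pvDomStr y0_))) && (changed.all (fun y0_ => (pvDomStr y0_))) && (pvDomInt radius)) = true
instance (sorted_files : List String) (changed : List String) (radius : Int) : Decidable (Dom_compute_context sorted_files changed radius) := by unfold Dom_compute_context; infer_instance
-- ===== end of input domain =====

-- B replaces A's per-changed-file window expansion (O(n*radius)) by two linear
-- nearest-changed-index scans (O(n)); a timing run measures the speed-up.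

-- ===== PORT A =====
def compute_context (sorted_files : List String) (changed : List String) (radius : Int) : List String :=
  let context : PySem.Set String :=
    (PySem.List.enumerate sorted_files 0).foldl
      (fun ctx p =>
        if p.2 ∈ changed then
          (PySem.List.pyRange (max 0 (p.1 - radius))
              (min (sorted_files.length : Int) (p.1 + radius + 1)) 1).foldl
            (fun ctx2 j =>
              let neighbor := PySem.List.pyGetD sorted_files j ""
              if neighbor ∈ changed then ctx2 else PySem.Set.add ctx2 neighbor)
            ctx
        else ctx)
      PySem.Set.empty
  PySem.List.sorted context (fun x => x) false

-- ===== PORT B =====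
-- _last_changed_scan's loop as the obvious structural recursion over the same state (index, last)
def lastChangedGo : List Bool → Int → Option Int → List (Option Int)
  | [], _, _ => []
  | b :: bs, i, last =>
    let l := if b then some i else last
    l :: lastChangedGo bs (i + 1) l

def lastChangedScan (flags : List Bool) : List (Option Int) :=
  lastChangedGo flags 0 none

def compute_context_alt (sorted_files : List String) (changed : List String) (radius : Int) : List String :=
  let n : Int := sorted_files.length
  let flags := sorted_files.map (fun f => decide (f ∈ changed))
  let left := lastChangedScan flags
  let right := (lastChangedScan flags.reverse).reverse.map (fun v => v.map (fun i => n - 1 - i))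
  let ctx : PySem.Set String :=
    PySem.Set.ofList
      (((PySem.List.enumerate (sorted_files.zip (flags.zip (left.zip right))) 0).filter
          (fun q =>
            !q.2.2.1 &&
              ((match q.2.2.2.1 with
                | some v => decide (q.1 - v ≤ radius)
                | none => false) ||
               (match q.2.2.2.2 with
                | some w => decide (w - q.1 ≤ radius)
                | none => false)))).map
        (fun q => q.2.1))
  PySem.List.sorted ctx (fun x => x) false

-- ===== PRECONDITION & SPEC =====
def Spec_compute_context (sorted_files : List String) (changed : List String) (radius : Int) (out : List String) : Prop := out = compute_context_alt sorted_files changed radius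
instance (sorted_files : List String) (changed : List String) (radius : Int) (out : List String) : Decidable (Spec_compute_context sorted_files changed radius out) := by unfold Spec_compute_context; infer_instance

-- ===== CLAIM (what is proved, stated in full; the proofs are below) =====
def Claim_equal_compute_context : Prop := ∀ (sorted_files : List String) (changed : List String) (radius : Int), Dom_compute_context sorted_files changed radius → Spec_compute_context sorted_files changed radius (compute_context sorted_files changed radius)

-- ===== LEMMAS AND PROOFS =====

theorem go_length (bs : List Bool) (i : Int) (last : Option Int) :
    (lastChangedGo bs i last).length = bs.length := by
  induction bs generalizing i last with
  | nil => simp [lastChangedGo]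
  | cons b bs ih => simp [lastChangedGo, ih]

theorem go_sound (bs : List Bool) (i : Int) (last : Option Int) (j : Nat)
    (hj : j < bs.length) (v : Int)
    (h : (lastChangedGo bs i last)[j]'(by rw [go_length]; exact hj) = some v) :
    (∃ (k : Nat) (hk : k < bs.length), k ≤ j ∧ bs[k] = true ∧ v = i + k) ∨ last = some v := by
  induction bs generalizing i last j with
  | nil => simp at hj
  | cons b bs ih =>
    cases j with
    | zero =>
      simp [lastChangedGo] at h
      by_cases hb : b = true
      · left; exact ⟨0, by simp, le_refl _, hb, by simp [hb] at h; omega⟩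
      · right; simp [hb] at h ⊢; omega
    | succ j =>
      simp only [lastChangedGo, List.getElem_cons_succ] at h
      rcases ih (i + 1) _ j (by simpa using hj) h with ⟨k, hk, hkj, hbk, hv⟩ | hl
      · exact Or.inl ⟨k + 1, by simpa using hk, by omega, by simpa using hbk, by push_cast; omega⟩
      · by_cases hb : b = true
        · simp [hb] at hl
          exact Or.inl ⟨0, by simp, by omega, hb, by omega⟩
        · simp [hb] at hl; right; omega

theorem go_last (bs : List Bool) (i : Int) (last : Option Int) (j : Nat)
    (hj : j < bs.length) (u : Int) (hu : last = some u) (hui : u ≤ i) :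
    ∃ v, (lastChangedGo bs i last)[j]'(by rw [go_length]; exact hj) = some v ∧ u ≤ v ∧ v ≤ i + j := by
  induction bs generalizing i last j u with
  | nil => simp at hj
  | cons b bs ih =>
    cases j with
    | zero =>
      by_cases hb : b = true
      · exact ⟨i, by simp [lastChangedGo, hb], hui, by omega⟩
      · exact ⟨u, by simp [lastChangedGo, hb, hu], le_refl _, by omega⟩
    | succ j =>
      by_cases hb : b = true
      · rcases ih (i + 1) (some i) j (by simpa using hj) i rfl (by omega) with ⟨v, hv, h1, h2⟩
        exact ⟨v, by simpa [lastChangedGo, hb] using hv, by omega, by push_cast; omega⟩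
      · rcases ih (i + 1) last j (by simpa using hj) u hu (by omega) with ⟨v, hv, h1, h2⟩
        exact ⟨v, by simpa [lastChangedGo, hb] using hv, h1, by push_cast; omega⟩

theorem go_complete (bs : List Bool) (i : Int) (last : Option Int) (j : Nat)
    (hj : j < bs.length) (k : Nat) (hk : k < bs.length) (hkj : k ≤ j) (hb : bs[k] = true) :
    ∃ v, (lastChangedGo bs i last)[j]'(by rw [go_length]; exact hj) = some v ∧
      i + k ≤ v ∧ v ≤ i + j := by
  induction bs generalizing i last j k with
  | nil => simp at hj
  | cons b bs ih =>
    cases j with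
    | zero =>
      interval_cases k
      simp at hb
      exact ⟨i, by simp [lastChangedGo, hb], by omega, by omega⟩
    | succ j =>
      cases k with
      | zero =>
        simp at hb
        rcases go_last bs (i + 1) (some i) j (by simpa using hj) i rfl (by omega) with ⟨v, hv, h1, h2⟩
        exact ⟨v, by simpa [lastChangedGo, hb] using hv, by omega, by push_cast; omega⟩
      | succ k =>
        rcases ih (i + 1) (if b then some i else last) j (by simpa using hj) k
            (by simpa using hk) (by omega) (by simpa using hb) with ⟨v, hv, h1, h2⟩
        exact ⟨v, by simpa [lastChangedGo] using hv, by push_cast at h1 ⊢; omega,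
          by push_cast; omega⟩

theorem mem_foldl_step {α β : Type} (step : List α → β → List α) (Q : β → α → Prop)
    (h : ∀ s b y, y ∈ step s b ↔ y ∈ s ∨ Q b y) (l : List β) (s : List α) (y : α) :
    y ∈ l.foldl step s ↔ y ∈ s ∨ ∃ b ∈ l, Q b y := by
  induction l generalizing s with
  | nil => simp
  | cons b bs ih => simp [List.foldl_cons, ih, h]; tauto

theorem nodup_foldl_step {α β : Type} (step : List α → β → List α)
    (h : ∀ s b, s.Nodup → (step s b).Nodup) (l : List β) (s : List α) (hs : s.Nodup) :
    (l.foldl step s).Nodup := by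
  induction l generalizing s with
  | nil => simpa
  | cons b bs ih => exact ih _ (h s b hs)

def Pctx (files changed : List String) (r : Int) (y : String) : Prop :=
  y ∉ changed ∧ ∃ (i j : Nat) (hi : i < files.length) (hj : j < files.length),
    files[i] ∈ changed ∧ files[j] = y ∧ (i : Int) - r ≤ (j : Int) ∧ (j : Int) ≤ (i : Int) + r

theorem memA (files changed : List String) (r : Int) (y : String) :
    y ∈ (PySem.List.enumerate files 0).foldl
      (fun ctx p =>
        if p.2 ∈ changed then
          (PySem.List.pyRange (max 0 (p.1 - r)) (min (files.length : Int) (p.1 + r + 1)) 1).foldl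
            (fun ctx2 j =>
              let neighbor := PySem.List.pyGetD files j ""
              if neighbor ∈ changed then ctx2 else PySem.Set.add ctx2 neighbor) ctx
        else ctx) PySem.Set.empty
    ↔ Pctx files changed r y := by
  rw [mem_foldl_step _
    (fun p z => p.2 ∈ changed ∧ ∃ j : Int,
      (max 0 (p.1 - r) ≤ j ∧ j < min (files.length : Int) (p.1 + r + 1)) ∧
      PySem.List.pyGetD files j "" ∉ changed ∧ z = PySem.List.pyGetD files j "")]
  · constructor
    · rintro (h | ⟨p, hp, hc, j, ⟨hj1, hj2⟩, hnb, hy⟩)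
      · simp [PySem.Set.empty] at h
      · rw [PySem.List.mem_enumerate_iff] at hp
        obtain ⟨k, hk, rfl⟩ := hp
        have h0 : (0 : Int) ≤ j := le_trans (le_max_left _ _) hj1
        have hjn : j < (files.length : Int) := lt_of_lt_of_le hj2 (min_le_left _ _)
        rw [PySem.List.pyGetD_eq_getElem files "" h0 hjn] at hnb hy
        refine ⟨hy ▸ hnb, k, j.toNat, hk, by omega, by simpa using hc, hy.symm, ?_, ?_⟩
        · simp at hj1; omega
        · simp at hj2; omega
    · rintro ⟨hy, i, j, hi, hj, hci, hfy, h1, h2⟩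
      right
      refine ⟨((i : Int), files[i]), ?_, by simpa using hci, (j : Int), ⟨?_, ?_⟩, ?_, ?_⟩
      · rw [PySem.List.mem_enumerate_iff]; exact ⟨i, hi, by simp⟩
      · simp; omega
      · simp; omega
      · rw [PySem.List.pyGetD_eq_getElem files "" (by omega) (by exact_mod_cast hj)]
        simpa [hfy] using hy
      · rw [PySem.List.pyGetD_eq_getElem files "" (by omega) (by exact_mod_cast hj)]
        simp [hfy]
  · intro s p z
    by_cases hc : p.2 ∈ changed
    · simp only [hc, if_pos]
      rw [mem_foldl_step _
        (fun j z => PySem.List.pyGetD files j "" ∉ changed ∧ z = PySem.List.pyGetD files j "")]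
      · simp only [PySem.List.mem_pyRange_one, true_and]
      · intro s' j' z'
        by_cases hn : PySem.List.pyGetD files j' "" ∈ changed
        · simp [hn]
        · simp [hn, PySem.Set.mem_add]
    · simp [hc]

theorem memB (files changed : List String) (r : Int) (y : String)
    (flags : List Bool) (left right : List (Option Int))
    (hfl : flags = files.map (fun f => decide (f ∈ changed)))
    (hl : left = lastChangedGo flags 0 none)
    (hr : right = (lastChangedGo flags.reverse 0 none).reverse.map
      (fun v => v.map (fun i => (files.length : Int) - 1 - i))) :
    y ∈ PySem.Set.ofList
      (((PySem.List.enumerate (files.zip (flags.zip (left.zip right))) 0).filter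
          (fun q =>
            !q.2.2.1 &&
              ((match q.2.2.2.1 with
                | some v => decide (q.1 - v ≤ r)
                | none => false) ||
               (match q.2.2.2.2 with
                | some w => decide (w - q.1 ≤ r)
                | none => false)))).map
        (fun q => q.2.1))
    ↔ Pctx files changed r y := by
  subst hl hr
  have hfln : flags.length = files.length := by simp [hfl]
  have hGL : (lastChangedGo flags.reverse 0 none).length = files.length := by
    rw [go_length]; simp [hfln]
  have hll : (lastChangedGo flags 0 none).length = files.length := by
    rw [go_length, hfln]
  have hrl : ((lastChangedGo flags.reverse 0 none).reverse.map
      (fun v => v.map (fun i => (files.length : Int) - 1 - i))).length = files.length := by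
    simp [hGL]
  have hZl : (files.zip (flags.zip ((lastChangedGo flags 0 none).zip
      ((lastChangedGo flags.reverse 0 none).reverse.map
        (fun v => v.map (fun i => (files.length : Int) - 1 - i)))))).length = files.length := by
    simp only [List.length_zip, List.length_map, List.length_reverse, hfln, hll, hGL, min_self]
  have hflag : ∀ (k : Nat) (hk : k < files.length),
      flags[k]'(by omega) = decide (files[k] ∈ changed) := by
    intro k hk; simp [hfl]
  -- right[k] unpacking, both directions, via getElem?
  have hright : ∀ (k : Nat) (hk : k < files.length) (ov : Option Int),
      ((lastChangedGo flags.reverse 0 none).reverse.map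
        (fun v => v.map (fun i => (files.length : Int) - 1 - i)))[k]'(by omega) = ov ↔
      ∃ ov', (lastChangedGo flags.reverse 0 none)[files.length - 1 - k]'(by omega) = ov' ∧
        ov = ov'.map (fun i => (files.length : Int) - 1 - i) := by
    intro k hk ov
    constructor
    · intro h
      refine ⟨(lastChangedGo flags.reverse 0 none)[files.length - 1 - k]'(by omega), rfl, ?_⟩
      rw [← h, List.getElem_map, List.getElem_reverse]
      simp only [hGL]
    · rintro ⟨ov', hov', rfl⟩
      rw [List.getElem_map, List.getElem_reverse]
      rw [← hov']
      congr 1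
      simp only [hGL]
  rw [PySem.Set.mem_ofList, List.mem_map]
  constructor
  · rintro ⟨q, hq, hy⟩
    rw [List.mem_filter] at hq
    obtain ⟨hqmem, hcond⟩ := hq
    rw [PySem.List.mem_enumerate_iff] at hqmem
    obtain ⟨k, hkZ, rfl⟩ := hqmem
    have hk : k < files.length := hZl ▸ hkZ
    have hZk : (files.zip (flags.zip ((lastChangedGo flags 0 none).zip
        ((lastChangedGo flags.reverse 0 none).reverse.map
          (fun v => v.map (fun i => (files.length : Int) - 1 - i))))))[k]'(by omega) =
        (files[k], (flags[k]'(by omega), ((lastChangedGo flags 0 none)[k]'(by omega),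
          ((lastChangedGo flags.reverse 0 none).reverse.map
            (fun v => v.map (fun i => (files.length : Int) - 1 - i)))[k]'(by omega)))) := by
      simp [List.getElem_zip]
    rw [hZk] at hcond hy
    simp only at hy
    simp only [Bool.and_eq_true, Bool.not_eq_true', Bool.or_eq_true] at hcond
    obtain ⟨hnf, hdisj⟩ := hcond
    have hyc : y ∉ changed := by
      rw [hflag k hk] at hnf
      simp at hnf; rwa [← hy]
    rcases hdisj with hml | hmr
    · rcases hv : (lastChangedGo flags 0 none)[k]'(by omega) with _ | v
      · rw [hv] at hml; simp at hml
      · rw [hv] at hml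
        simp only [decide_eq_true_eq] at hml
        rcases go_sound flags 0 none k (by omega) v hv with ⟨m, hm, hmk, hbm, hveq⟩ | hnone
        · refine ⟨hyc, m, k, by omega, hk, ?_, hy, by omega, by omega⟩
          rw [hflag m (by omega)] at hbm; simpa using hbm
        · simp at hnone
    · rcases hw : ((lastChangedGo flags.reverse 0 none).reverse.map
          (fun v => v.map (fun i => (files.length : Int) - 1 - i)))[k]'(by omega) with _ | w
      · rw [hw] at hmr; simp at hmr
      · rw [hw] at hmr
        simp only [decide_eq_true_eq] at hmr
        obtain ⟨ov', hov', hmap⟩ := (hright k hk _).mp hw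
        rcases ov' with _ | v
        · simp at hmap
        · simp only [Option.map_some, Option.some.injEq] at hmap
          rcases go_sound flags.reverse 0 none (files.length - 1 - k)
              (by simp [hfln]; omega) v hov' with ⟨m, hm, hmk, hbm, hveq⟩ | hnone
          · have hmn : m < files.length := by simp [hfln] at hm; omega
            have hbm' : flags[files.length - 1 - m]'(by omega) = true := by
              rw [List.getElem_reverse] at hbm
              rw [← hbm]; congr 1; omega
            refine ⟨hyc, files.length - 1 - m, k, by omega, hk, ?_, hy, ?_, ?_⟩
            · rw [hflag _ (by omega)] at hbm'; simpa using hbm'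
            · omega
            · omega
          · simp at hnone
  · rintro ⟨hyc, i, j, hi, hj, hci, hfy, h1, h2⟩
    have hnfj : flags[j]'(by omega) = false := by
      rw [hflag j hj]; simp [hfy, hyc]
    have hfi : flags[i]'(by omega) = true := by
      rw [hflag i hi]; simp [hci]
    refine ⟨((j : Int), (files.zip (flags.zip ((lastChangedGo flags 0 none).zip
        ((lastChangedGo flags.reverse 0 none).reverse.map
          (fun v => v.map (fun i => (files.length : Int) - 1 - i))))))[j]'(by omega)), ?_, ?_⟩
    · rw [List.mem_filter]
      refine ⟨?_, ?_⟩
      · rw [PySem.List.mem_enumerate_iff]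
        exact ⟨j, by omega, by simp⟩
      · have hZj : (files.zip (flags.zip ((lastChangedGo flags 0 none).zip
            ((lastChangedGo flags.reverse 0 none).reverse.map
              (fun v => v.map (fun i => (files.length : Int) - 1 - i))))))[j]'(by omega) =
            (files[j], (flags[j]'(by omega), ((lastChangedGo flags 0 none)[j]'(by omega),
              ((lastChangedGo flags.reverse 0 none).reverse.map
                (fun v => v.map (fun i => (files.length : Int) - 1 - i)))[j]'(by omega)))) := by
          simp [List.getElem_zip]
        rw [hZj]
        simp only [Bool.and_eq_true, Bool.not_eq_true', Bool.or_eq_true]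
        refine ⟨hnfj, ?_⟩
        by_cases hij : i ≤ j
        · left
          obtain ⟨v, hv, hv1, hv2⟩ :=
            go_complete flags 0 none j (by omega) i (by omega) hij hfi
          rw [hv]
          simp only [decide_eq_true_eq]
          omega
        · right
          have hbm : flags.reverse[files.length - 1 - i]'(by simp [hfln]; omega) = true := by
            rw [List.getElem_reverse]
            rw [← hfi]; congr 1; simp [hfln]; omega
          obtain ⟨v, hv, hv1, hv2⟩ :=
            go_complete flags.reverse 0 none (files.length - 1 - j) (by simp [hfln]; omega)
              (files.length - 1 - i) (by simp [hfln]; omega) (by omega) hbm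
          have hrj := (hright j hj (some ((files.length : Int) - 1 - v))).mpr
            ⟨some v, hv, by simp⟩
          rw [hrj]
          simp only [decide_eq_true_eq]
          omega
    · simp [List.getElem_zip, hfy]

theorem nodupA (files changed : List String) (r : Int) :
    ((PySem.List.enumerate files 0).foldl
      (fun ctx p =>
        if p.2 ∈ changed then
          (PySem.List.pyRange (max 0 (p.1 - r)) (min (files.length : Int) (p.1 + r + 1)) 1).foldl
            (fun ctx2 j =>
              let neighbor := PySem.List.pyGetD files j ""
              if neighbor ∈ changed then ctx2 else PySem.Set.add ctx2 neighbor) ctx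
        else ctx) PySem.Set.empty).Nodup := by
  apply nodup_foldl_step
  · intro s p hs
    by_cases hc : p.2 ∈ changed
    · simp only [hc, if_pos]
      apply nodup_foldl_step
      · intro s' j hs'
        by_cases hn : PySem.List.pyGetD files j "" ∈ changed
        · simpa [hn]
        · simp only [hn, if_neg, not_false_iff]
          exact PySem.Set.nodup_add _ _ hs'
      · exact hs
    · simpa [hc]
  · simp [PySem.Set.empty]

-- ===== VERDICT (by name: the statement is the Claim_ definition above) =====
theorem compute_context_spec : Claim_equal_compute_context := by
  intro files changed r _
  unfold Spec_compute_context
  simp only [compute_context, compute_context_alt]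
  apply PySem.List.sorted_eq_sorted_of_perm _ _ _ (fun a b h => h)
  refine (List.perm_ext_iff_of_nodup (nodupA files changed r) (PySem.Set.nodup_ofList _)).mpr ?_
  intro y
  exact (memA files changed r y).trans
    (memB files changed r y _ _ _ rfl rfl rfl).symm
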